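-- pv_equiv track=rewrite | github.com/lukegood/PreGP | pretrain.py | cut_and_kmer
-- ===== SOURCE A (Python) =====
-- import math
--
-- def cut_and_kmer(origin_data, cut_length, k, bag_num):
--     # Split data
--     cut_list = []
--     for _, line in origin_data.items():
--         data = line.strip().split(",")
--         times = math.ceil(len(data) / cut_length)
--         start = 0
--         for _ in range(times):
--             end = start + cut_length
--             sub_list = data[start:end]
--             # Reconnect with comma and write to file
--             cut_list.append(",".join(sub_list))
--             start = end
--     # Perform k-mer conversion on the split data
--     kmer_list = []
--     for seq in cut_list:
--         seq = seq.strip().replace(",", "")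
--         kmers = [seq[x : x + (k * bag_num)]
--              for x in range(0, len(seq) - k * bag_num + bag_num, bag_num)]
--         kmer_list.append(" ".join(kmers))
--     return kmer_list
-- ===== SOURCE B (Python) =====
-- def cut_and_kmer(origin_data, cut_length, k, bag_num):
--     # Consume each split line by repeatedly detaching its first cut_length
--     # fields (no ceil arithmetic, no index bookkeeping), and build each chunk's
--     # sequence directly by concatenation -- edge-trimming only the first and
--     # last field -- instead of join -> strip -> replace.
--     width = k * bag_num
--     out = []
--     for line in origin_data.values():
--         data = line.strip().split(",")
--         while data:
--             chunk, data = data[:cut_length], data[cut_length:]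
--             if len(chunk) == 1:
--                 seq = chunk[0].strip()
--             else:
--                 seq = "".join([chunk[0].lstrip()] + chunk[1:-1] + [chunk[-1].rstrip()])
--             kmers = [seq[x : x + width] for x in range(0, len(seq) - width + bag_num, bag_num)]
--             out.append(" ".join(kmers))
--     return out
-- ===== Notes on version B (the rewrite author's own statement) =====
-- stated objective: alternative
-- what changed: B makes one pass that consumes each split line by repeatedly detaching its first cut_length fields (no math.ceil, no start/end index bookkeeping, no intermediate cut_list), and builds each chunk's sequence by direct concatenation that edge-trims only the first and last field (lstrip/rstrip), instead of A's comma-join -> strip -> replace pipeline; correct because split(',') fields are comma-free, so strip of the joined string only reaches into the first and last field.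
-- outside the precondition, e.g. on cut_and_kmer({'a': 'x'}, -2, 1, 1): A returns [], B raises IndexError; on cut_and_kmer({'a': 'x'}, 0, 1, 1): A raises ZeroDivisionError, B raises IndexError; on cut_and_kmer({'a': 'xy'}, 1, 1, 0): A raises ValueError, B raises ValueError
import Mathlib
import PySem

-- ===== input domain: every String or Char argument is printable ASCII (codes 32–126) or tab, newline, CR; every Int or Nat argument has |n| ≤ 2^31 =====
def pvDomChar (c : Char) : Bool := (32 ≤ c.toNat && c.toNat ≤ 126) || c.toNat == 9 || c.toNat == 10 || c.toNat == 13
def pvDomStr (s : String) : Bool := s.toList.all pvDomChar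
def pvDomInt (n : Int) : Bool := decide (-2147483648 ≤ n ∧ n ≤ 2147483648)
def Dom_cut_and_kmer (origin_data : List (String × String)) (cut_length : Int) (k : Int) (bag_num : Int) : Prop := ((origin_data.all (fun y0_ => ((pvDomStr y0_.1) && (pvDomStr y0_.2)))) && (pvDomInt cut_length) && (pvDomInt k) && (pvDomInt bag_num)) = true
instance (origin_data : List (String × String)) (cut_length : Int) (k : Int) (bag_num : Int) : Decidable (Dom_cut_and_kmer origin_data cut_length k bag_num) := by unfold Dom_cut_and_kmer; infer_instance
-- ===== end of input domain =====

-- B consumes each split line by repeatedly detaching its first cut_length fields (no ceil, no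
-- index bookkeeping, no intermediate cut_list) and builds each chunk's sequence by direct
-- concatenation that edge-trims only the first and last field, instead of A's
-- join→strip→replace pipeline (objective: alternative decomposition, same cost).

-- ===== PORT A =====
-- math.ceil(len(data)/cut_length) is ported as exact integer ceiling division
-- -((-len) // cut_length); exact since len(data) is far below 2^52.
def cut_and_kmer (origin_data : List (String × String)) (cut_length : Int) (k : Int) (bag_num : Int) : List String :=
  let cut_list : List String :=
    (PySem.Dict.ofList origin_data).items.foldl (fun cl p =>
      let data := (PySem.Str.split? (PySem.Str.strip p.2) ",").getD []
      let times : Int := -(PySem.Int.floordiv (-(data.length : Int)) cut_length)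
      ((PySem.List.pyRange 0 times 1).foldl (fun (st : List String × Int) _ =>
          let end_ := st.2 + cut_length
          let sub_list := PySem.List.slice data (some st.2) (some end_)
          (st.1 ++ [PySem.Str.join "," sub_list], end_)) (cl, 0)).1) []
  cut_list.foldl (fun kl seq0 =>
    let seq := PySem.Str.replace (PySem.Str.strip seq0) "," ""
    let kmers := (PySem.List.pyRange 0 (PySem.Str.len seq - k * bag_num + bag_num) bag_num).map
      (fun x => PySem.Str.slice seq (some x) (some (x + k * bag_num)))
    kl ++ [PySem.Str.join " " kmers]) []

-- ===== PORT B =====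
-- ' '.join of the k-mer comprehension (Source B: kmers = [...]; out.append(' '.join(kmers)))
def pvKmer (k bag_num : Int) (seq : String) : String :=
  PySem.Str.join " " ((PySem.List.pyRange 0 (PySem.Str.len seq - k * bag_num + bag_num) bag_num).map
    (fun x => PySem.Str.slice seq (some x) (some (x + k * bag_num))))

-- Source B's 'while data:' loop; the fuel argument (initial length of data) only makes the
-- recursion total: inside Pre_ each iteration drops cut_length ≥ 1 fields, so it never runs out.
def pvBody (c k b : Int) : Nat → List String → List String → List String
  | 0, _, out => out
  | _ + 1, [], out => out
  | fuel + 1, d :: ds, out =>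
      let data := d :: ds
      let chunk := PySem.List.slice data none (some c)
      let rest := PySem.List.slice data (some c) none
      let seq : String :=
        if chunk.length = 1 then PySem.Str.strip ((PySem.List.pyGet? chunk 0).getD "")
        else PySem.Str.join "" ([PySem.Str.lstrip ((PySem.List.pyGet? chunk 0).getD "")] ++
               PySem.List.slice chunk (some 1) (some (-1)) ++
               [PySem.Str.rstrip ((PySem.List.pyGet? chunk (-1)).getD "")])
      pvBody c k b fuel rest (out ++ [pvKmer k b seq])


def cut_and_kmer_alt (origin_data : List (String × String)) (cut_length : Int) (k : Int) (bag_num : Int) : List String :=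
  (PySem.Dict.ofList origin_data).values.foldl (fun out line =>
    let data := (PySem.Str.split? (PySem.Str.strip line) ",").getD []
    pvBody cut_length k bag_num data.length data out) []


-- ===== PRECONDITION & SPEC =====
-- Pre_ excludes, on a nonempty dict, cut_length ≤ 0 and bag_num = 0: at cut_length = 0 A raises
-- ZeroDivisionError and at bag_num = 0 A raises ValueError (range step 0); for negative
-- cut_length A's ceil yields zero chunks, so A returns an accidental empty list that B's own
-- consuming loop cannot produce (B raises IndexError on the empty slice there).
def Pre_cut_and_kmer (origin_data : List (String × String)) (cut_length : Int) (k : Int) (bag_num : Int) : Prop :=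
  origin_data = [] ∨ (0 < cut_length ∧ bag_num ≠ 0)
instance (origin_data : List (String × String)) (cut_length : Int) (k : Int) (bag_num : Int) : Decidable (Pre_cut_and_kmer origin_data cut_length k bag_num) := by unfold Pre_cut_and_kmer; infer_instance
def pvWitness_cut_and_kmer : (List (String × String)) × Int × Int × Int := ([("a", "AC,GT")], 2, 1, 1)

def Spec_cut_and_kmer (origin_data : List (String × String)) (cut_length : Int) (k : Int) (bag_num : Int) (out : List String) : Prop := out = cut_and_kmer_alt origin_data cut_length k bag_num
instance (origin_data : List (String × String)) (cut_length : Int) (k : Int) (bag_num : Int) (out : List String) : Decidable (Spec_cut_and_kmer origin_data cut_length k bag_num out) := by unfold Spec_cut_and_kmer; infer_instance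

-- ===== CLAIM =====
def Claim_equal_cut_and_kmer : Prop := ∀ (origin_data : List (String × String)) (cut_length : Int) (k : Int) (bag_num : Int), Dom_cut_and_kmer origin_data cut_length k bag_num → Pre_cut_and_kmer origin_data cut_length k bag_num → Spec_cut_and_kmer origin_data cut_length k bag_num (cut_and_kmer origin_data cut_length k bag_num)

-- ===== LEMMAS AND PROOFS =====

theorem pv_comma_not_space : PySem.Chars.isspace ',' = false := by decide

theorem pv_dropWhile_comma (a b : List Char) :
    List.dropWhile PySem.Chars.isspace (a ++ ',' :: b)
      = List.dropWhile PySem.Chars.isspace a ++ ',' :: b := by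
  induction a with
  | nil => simp [pv_comma_not_space]
  | cons x xs ih => simp only [List.cons_append, List.dropWhile_cons]; split <;> simp [ih]

theorem pv_lstrip_comma (a b : List Char) :
    PySem.Chars.lstrip (a ++ ',' :: b) = PySem.Chars.lstrip a ++ ',' :: b := by
  simp [PySem.Chars.lstrip, pv_dropWhile_comma]

theorem pv_rstrip_comma (a b : List Char) :
    PySem.Chars.rstrip (a ++ ',' :: b) = a ++ ',' :: PySem.Chars.rstrip b := by
  simp only [PySem.Chars.rstrip, List.reverse_append, List.reverse_cons]
  rw [show b.reverse ++ [','] ++ a.reverse = b.reverse ++ ',' :: a.reverse by simp,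
      pv_dropWhile_comma]
  simp

theorem pv_replace_go (fuel : Nat) : ∀ (l acc : List Char), l.length ≤ fuel →
    PySem.Chars.replace.go [','] [] fuel l acc
      = acc.reverse ++ l.filter (fun ch => !(ch == ',')) := by
  induction fuel with
  | zero =>
    intro l acc h
    have : l = [] := List.length_eq_zero_iff.mp (Nat.le_zero.mp h)
    subst this; simp [PySem.Chars.replace.go]
  | succ f ih =>
    intro l acc h
    cases l with
    | nil => simp [PySem.Chars.replace.go]
    | cons c t =>
      rw [PySem.Chars.replace.go]
      by_cases hc : c = ','
      · subst hc
        simp only [List.isPrefixOf, BEq.rfl, Bool.true_and, List.isPrefixOf_nil_left, if_pos]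
        rw [ih _ _ (by simpa using Nat.le_of_succ_le_succ h)]
        simp
      · have hp : [','].isPrefixOf (c :: t) = false := by
          simp [List.isPrefixOf]; exact fun hh => (hc hh.symm).elim
        simp only [hp, Bool.false_eq_true, if_false]
        rw [ih _ _ (by simpa using Nat.le_of_succ_le_succ h)]
        simp [hc]

theorem pv_replace_comma (s : List Char) :
    PySem.Chars.replace s [','] [] = s.filter (fun ch => !(ch == ',')) := by
  rw [PySem.Chars.replace]
  simp only [List.isEmpty_cons, Bool.false_eq_true, if_false]
  exact pv_replace_go s.length s [] le_rfl

theorem pv_splitOn_go (fuel : Nat) : ∀ (l cur : List Char) (acc : List (List Char)),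
    l.length < fuel → ',' ∉ cur → (∀ p ∈ acc, ',' ∉ p) →
    ∀ p ∈ PySem.Chars.splitOn.go [','] fuel l cur acc, ',' ∉ p := by
  induction fuel with
  | zero => intro l cur acc h; omega
  | succ f ih =>
    intro l cur acc h hcur hacc
    cases l with
    | nil =>
      rw [PySem.Chars.splitOn.go]
      intro p hp
      simp only [List.mem_reverse, List.mem_cons] at hp
      rcases hp with h1 | h2
      · subst h1; simpa using hcur
      · exact hacc _ h2
      omega
    | cons c t =>
      rw [PySem.Chars.splitOn.go]
      by_cases hc : c = ','
      · subst hc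
        simp only [List.isPrefixOf, BEq.rfl, Bool.true_and, List.isPrefixOf_nil_left, if_pos,
          List.length_cons, List.drop_succ_cons, List.drop_zero]
        exact ih _ _ _ (by simp at h ⊢; omega) (by simp)
          (by intro p hp; rcases List.mem_cons.mp hp with h1 | h2
              · subst h1; simpa using hcur
              · exact hacc _ h2)
      · have hp : [','].isPrefixOf (c :: t) = false := by
          simp [List.isPrefixOf]; exact fun hh => (hc hh.symm).elim
        simp only [hp, Bool.false_eq_true, if_false]
        exact ih _ _ _ (by simp at h ⊢; omega)
          (by intro hm; rcases List.mem_cons.mp hm with h1 | h2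
              · exact hc h1.symm
              · exact hcur h2) hacc

theorem pv_splitOn_comma_free (s : List Char) :
    ∀ p ∈ PySem.Chars.splitOn s [','], ',' ∉ p := by
  rw [PySem.Chars.splitOn]
  exact pv_splitOn_go _ _ _ _ (by omega) (by simp) (by simp)

theorem pv_mem_lstrip {x : Char} (a : List Char) (h : x ∈ PySem.Chars.lstrip a) : x ∈ a := by
  rw [PySem.Chars.lstrip] at h
  exact (List.dropWhile_sublist _).mem h

theorem pv_mem_rstrip {x : Char} (a : List Char) (h : x ∈ PySem.Chars.rstrip a) : x ∈ a := by
  rw [PySem.Chars.rstrip] at h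
  rw [List.mem_reverse] at h
  simpa using (List.dropWhile_sublist _).mem h

theorem pv_filter_self (a : List Char) (h : ',' ∉ a) :
    a.filter (fun ch => !(ch == ',')) = a := by
  apply List.filter_eq_self.mpr
  intro x hx
  simp only [Bool.not_eq_eq_eq_not, Bool.not_true, beq_eq_false_iff_ne, ne_eq]
  rintro rfl; exact h hx

theorem pv_block (rs : List (List Char)) : ∀ (r a : List Char),
    (∀ p ∈ r :: rs, ',' ∉ p) →
    List.filter (fun ch => !(ch == ',')) (PySem.Chars.rstrip (a ++ ',' :: PySem.Chars.join [','] (r :: rs)))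
      = List.filter (fun ch => !(ch == ',')) a ++ ((r :: rs).dropLast).flatten
          ++ PySem.Chars.rstrip (rs.getLastD r) := by
  induction rs with
  | nil =>
    intro r a hcf
    rw [PySem.Chars.join_singleton, pv_rstrip_comma]
    simp only [List.dropLast_singleton, List.flatten_nil, List.append_nil, List.getLastD_nil]
    rw [List.filter_append]
    simp only [List.filter_cons, show (!(',' == ',')) = false by decide, Bool.false_eq_true, if_false]
    rw [pv_filter_self _ (fun hm => hcf r (by simp) (pv_mem_rstrip _ hm))]
  | cons r2 rs' ih =>
    intro r a hcf
    rw [PySem.Chars.join_cons_cons,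
        show a ++ ',' :: (r ++ [','] ++ PySem.Chars.join [','] (r2 :: rs'))
           = (a ++ ',' :: r) ++ ',' :: PySem.Chars.join [','] (r2 :: rs') by simp]
    rw [ih r2 (a ++ ',' :: r) (fun p hp => hcf p (by
      rcases List.mem_cons.mp hp with h1 | h2
      · simp [h1]
      · simp [List.mem_cons.mpr (Or.inr h2)]))]
    rw [List.filter_append]
    simp only [List.filter_cons, show (!(',' == ',')) = false by decide, Bool.false_eq_true, if_false]
    rw [pv_filter_self r (hcf r (by simp))]
    rw [List.dropLast_cons₂, List.flatten_cons]
    have : (r2 :: rs').getLastD r = rs'.getLastD r2 := List.getLastD_cons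
    rw [this]
    simp [List.append_assoc]

theorem pv_join_nil_flatten (ps : List (List Char)) :
    PySem.Chars.join [] ps = ps.flatten := by
  match ps with
  | [] => rw [PySem.Chars.join_nil]; rfl
  | [p] => rw [PySem.Chars.join_singleton]; simp
  | p :: q :: rest =>
    rw [PySem.Chars.join_cons_cons, pv_join_nil_flatten (q :: rest)]
    simp

theorem pv_slice_mid {α : Type} (x : α) (xs : List α) :
    PySem.List.slice (x :: xs) (some 1) (some (-1)) = xs.dropLast := by
  have h1 : PySem.List.clampIdx (x :: xs).length 1 = 1 := by
    simp [PySem.List.clampIdx]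
  have h2 : PySem.List.clampIdx (x :: xs).length (-1) = xs.length := by
    simp [PySem.List.clampIdx]
  simp only [PySem.List.slice, h1, h2]
  simp [List.dropLast_eq_take]

theorem pv_pyGet_zero {α : Type} (x : α) (xs : List α) :
    PySem.List.pyGet? (x :: xs) 0 = some x := by
  simp [PySem.List.pyGet?, PySem.List.pyIdx?]

theorem pv_pyGet_neg_one {α : Type} (x : α) (xs : List α) :
    PySem.List.pyGet? (x :: xs) (-1) = (x :: xs).getLast? := by
  rw [List.getLast?_eq_getElem?]
  simp [PySem.List.pyGet?, PySem.List.pyIdx?]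

theorem pv_mem_strip {x : Char} (a : List Char) (h : x ∈ PySem.Chars.strip a) : x ∈ a := by
  rw [PySem.Chars.strip] at h
  exact pv_mem_lstrip _ (pv_mem_rstrip _ h)

theorem pv_map_getLastD {α β : Type} (f : α → β) (l : List α) :
    ∀ d, (l.map f).getLastD (f d) = f (l.getLastD d) := by
  induction l with
  | nil => intro d; rfl
  | cons x xs ih => intro d; simp only [List.map_cons, List.getLastD_cons, ih]

theorem pv_comma_str : (",":String).toList = [','] := by rfl
theorem pv_empty_str : ("":String).toList = [] := by rfl

theorem pv_dropLast_map {α β : Type} (f : α → β) (l : List α) :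
    (l.map f).dropLast = l.dropLast.map f := by
  induction l with
  | nil => rfl
  | cons x xs ih =>
    cases xs with
    | nil => rfl
    | cons y ys => simp only [List.map_cons, List.dropLast_cons₂, ← ih, List.map_cons]

theorem pv_seq_eq (chunk : List String) (hne : chunk ≠ [])
    (hcf : ∀ e ∈ chunk, ',' ∉ e.toList) :
    PySem.Str.replace (PySem.Str.strip (PySem.Str.join "," chunk)) "," "" =
      (if chunk.length = 1 then PySem.Str.strip ((PySem.List.pyGet? chunk 0).getD "")
       else PySem.Str.join "" ([PySem.Str.lstrip ((PySem.List.pyGet? chunk 0).getD "")] ++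
              PySem.List.slice chunk (some 1) (some (-1)) ++
              [PySem.Str.rstrip ((PySem.List.pyGet? chunk (-1)).getD "")])) := by
  match chunk with
  | [] => exact absurd rfl hne
  | [e] =>
    rw [if_pos (show ([e] : List String).length = 1 from rfl), pv_pyGet_zero, Option.getD_some]
    apply String.toList_inj.mp
    rw [PySem.Str.toList_replace, PySem.Str.toList_strip, PySem.Str.toList_join,
        pv_comma_str, pv_empty_str, List.map_cons, List.map_nil, PySem.Chars.join_singleton,
        pv_replace_comma, pv_filter_self _ (fun hm => hcf e (by simp) (pv_mem_strip _ hm)),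
        PySem.Str.toList_strip]
  | e :: r :: rest =>
    rw [if_neg (by simp)]
    apply String.toList_inj.mp
    rw [PySem.Str.toList_replace, PySem.Str.toList_strip, PySem.Str.toList_join,
        pv_comma_str, pv_empty_str]
    rw [List.map_cons, List.map_cons, PySem.Chars.join_cons_cons]
    rw [show e.toList ++ [','] ++ PySem.Chars.join [','] (r.toList :: rest.map String.toList)
          = e.toList ++ ',' :: PySem.Chars.join [','] (r.toList :: rest.map String.toList) by simp]
    rw [PySem.Chars.strip, pv_lstrip_comma, pv_replace_comma]
    rw [pv_block (rest.map String.toList) r.toList (PySem.Chars.lstrip e.toList)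
        (by intro p hp
            rcases List.mem_cons.mp hp with h1 | h2
            · subst h1; exact hcf r (by simp)
            · rcases List.mem_map.mp h2 with ⟨y, hy, rfl⟩
              exact hcf y (by simp [hy]))]
    rw [pv_filter_self _ (fun hm => hcf e (by simp) (pv_mem_lstrip _ hm))]
    -- RHS
    rw [PySem.Str.toList_join, pv_empty_str, pv_join_nil_flatten]
    rw [pv_pyGet_zero, pv_pyGet_neg_one, pv_slice_mid]
    simp only [Option.getD_some, List.map_append, List.map_cons, List.map_nil,
      List.flatten_append, List.flatten_cons, List.flatten_nil,
      PySem.Str.toList_lstrip, PySem.Str.toList_rstrip]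
    rw [← List.getLastD_eq_getLast?]
    rw [List.getLastD_cons, List.getLastD_cons]
    have hdl : (r.toList :: rest.map String.toList).dropLast = ((r :: rest).dropLast).map String.toList := by
      rw [← List.map_cons, pv_dropLast_map]
    have hgl : (rest.map String.toList).getLastD r.toList = (rest.getLastD r).toList := by
      simpa using pv_map_getLastD String.toList rest r
    rw [hdl, hgl]
    -- flatten of mapped dropLast on both sides
    have hfl : (((r :: rest).dropLast).map String.toList).flatten
        = (((r :: rest).dropLast).map String.toList).flatten := rfl
    simp [List.append_assoc]

theorem pv_slice_shift {α : Type} (data : List α) (m c : Int) (hm : 0 ≤ m) (hc : 0 < c) :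
    PySem.List.slice data (some (m + c)) (some (m + c + c))
      = PySem.List.slice (data.drop c.toNat) (some m) (some (m + c)) := by
  rw [PySem.List.slice_toNat data (by omega) (by omega),
      PySem.List.slice_toNat (data.drop c.toNat) hm (by omega),
      List.drop_drop]
  rw [show (m + c).toNat = c.toNat + m.toNat by omega]
  congr 1
  omega

-- the ceiling count of a nonempty list is one more than that of its tail-after-c.
theorem pv_times_succ (c : Int) (hc : 0 < c) (L : Nat) (hL : 0 < L) :
    -(PySem.Int.floordiv (-(L : Int)) c) = -(PySem.Int.floordiv (-((L - c.toNat : Nat) : Int)) c) + 1 := by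
  rcases le_or_gt L c.toNat with hle | hgt
  · have h0 : ((L - c.toNat : Nat) : Int) = 0 := by omega
    rw [h0]
    have hz : -(PySem.Int.floordiv (-(0 : Int)) c) = 0 :=
      (PySem.Int.neg_floordiv_neg_eq_iff_of_pos hc).mpr ⟨by nlinarith, by simp⟩
    rw [hz]
    apply (PySem.Int.neg_floordiv_neg_eq_iff_of_pos hc).mpr
    constructor
    · simp; omega
    · simp; omega
  · have h0 : ((L - c.toNat : Nat) : Int) = (L : Int) - c := by omega
    rw [h0]
    have hb' := (PySem.Int.neg_floordiv_neg_eq_iff_of_pos hc (a := (L : Int) - c)).mp rfl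
    apply (PySem.Int.neg_floordiv_neg_eq_iff_of_pos hc).mpr
    constructor <;> nlinarith [hb'.1, hb'.2]


theorem pv_chunk_loop (data : List String) (c : Int) (l : List Int) (acc : List String) (s : Int) :
    (l.foldl (fun (st : List String × Int) _ =>
        (st.1 ++ [PySem.Str.join "," (PySem.List.slice data (some st.2) (some (st.2 + c)))], st.2 + c)) (acc, s)).1
      = acc ++ (List.range l.length).map (fun (i : Nat) =>
          PySem.Str.join "," (PySem.List.slice data (some (s + (i : Int) * c)) (some (s + (i : Int) * c + c)))) := by
  induction l generalizing acc s with
  | nil => simp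
  | cons x xs ih =>
    rw [List.foldl_cons, ih]
    rw [List.length_cons, List.range_succ_eq_map, List.map_cons, List.map_map, List.append_assoc]
    simp only [Nat.cast_zero, zero_mul, add_zero, List.singleton_append, Function.comp_def]
    congr 2
    apply List.map_congr_left; intro i _
    congr 2 <;> · congr 1; push_cast; ring

theorem pv_foldl_flat {α β : Type} (f : α → List β) (xs : List α) (acc : List β) :
    xs.foldl (fun cl x => cl ++ f x) acc = acc ++ xs.flatMap f := by
  induction xs generalizing acc with
  | nil => simp
  | cons x xs ih => simp [List.foldl_cons, ih]

theorem pv_flatMap_congr {α β : Type} (xs : List α) (g h : α → List β)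
    (hpt : ∀ a ∈ xs, g a = h a) : xs.flatMap g = xs.flatMap h := by
  induction xs with
  | nil => rfl
  | cons x xs ih =>
    simp only [List.flatMap_cons]
    rw [hpt x (by simp), ih (fun a ha => hpt a (by simp [ha]))]

theorem pv_split_comma_free (s : String) :
    ∀ e ∈ (PySem.Str.split? s ",").getD [], ',' ∉ e.toList := by
  intro e he
  rw [PySem.Str.split?] at he
  rw [show (",":String).toList = [','] from rfl] at he
  rw [PySem.Chars.split?] at he
  simp only [List.isEmpty_cons, Bool.false_eq_true, if_false, Option.map_some, Option.getD_some] at he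
  rcases List.mem_map.mp he with ⟨p, hp, rfl⟩
  rw [String.toList_ofList]
  exact pv_splitOn_comma_free s.toList p hp

-- proof-side helpers
def pvF (c k b : Int) (p : String × String) : List String :=
  (List.range
      (-(PySem.Int.floordiv (-((((PySem.Str.split? (PySem.Str.strip p.2) ",").getD []).length : Int))) c)).toNat).map
    (fun (i : Nat) => pvKmer k b (PySem.Str.replace (PySem.Str.strip
      (PySem.Str.join "," (PySem.List.slice ((PySem.Str.split? (PySem.Str.strip p.2) ",").getD [])
        (some ((i : Int) * c)) (some ((i : Int) * c + c))))) "," ""))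


theorem pv_body_cons (c k b : Int) (fuel : Nat) (d : String) (ds out : List String) :
    pvBody c k b (fuel + 1) (d :: ds) out
      = pvBody c k b fuel (PySem.List.slice (d :: ds) (some c) none)
          (out ++ [pvKmer k b
            (if (PySem.List.slice (d :: ds) none (some c)).length = 1 then
               PySem.Str.strip ((PySem.List.pyGet? (PySem.List.slice (d :: ds) none (some c)) 0).getD "")
             else
               PySem.Str.join "" ([PySem.Str.lstrip ((PySem.List.pyGet? (PySem.List.slice (d :: ds) none (some c)) 0).getD "")] ++
                 PySem.List.slice (PySem.List.slice (d :: ds) none (some c)) (some 1) (some (-1)) ++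
                 [PySem.Str.rstrip ((PySem.List.pyGet? (PySem.List.slice (d :: ds) none (some c)) (-1)).getD "")]))]) := rfl

theorem pv_body_eq (c k b : Int) (hc : 0 < c) :
    ∀ (n : Nat) (data : List String), data.length ≤ n → (∀ e ∈ data, ',' ∉ e.toList) → ∀ out,
      pvBody c k b n data out
        = out ++ (List.range (-(PySem.Int.floordiv (-(data.length : Int)) c)).toNat).map
            (fun (i : Nat) => pvKmer k b (PySem.Str.replace (PySem.Str.strip
              (PySem.Str.join "," (PySem.List.slice data (some ((i : Int) * c)) (some ((i : Int) * c + c))))) "," "")) := by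
  intro n
  induction n with
  | zero =>
    intro data hlen _ out
    have hd : data = [] := List.length_eq_zero_iff.mp (Nat.le_zero.mp hlen)
    subst hd
    have hz : -(PySem.Int.floordiv (-((0 : Nat) : Int)) c) = 0 :=
      (PySem.Int.neg_floordiv_neg_eq_iff_of_pos hc).mpr ⟨by nlinarith, by simp⟩
    simp only [List.length_nil] at *
    rw [pvBody, hz]
    simp
  | succ n ih =>
    intro data hlen hcf out
    cases data with
    | nil =>
      have hz : -(PySem.Int.floordiv (-((0 : Nat) : Int)) c) = 0 :=
        (PySem.Int.neg_floordiv_neg_eq_iff_of_pos hc).mpr ⟨by nlinarith, by simp⟩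
      rw [pvBody]
      simp only [List.length_nil, hz]
      simp
    | cons d ds =>
      rw [pv_body_cons]
      rw [PySem.List.slice_from _ (le_of_lt hc)]
      rw [ih ((d :: ds).drop c.toNat)
            (by simp at hlen ⊢; omega)
            (fun e he => hcf e (List.mem_of_mem_drop he))
            (out ++ [_])]
      have hT := pv_times_succ c hc (d :: ds).length (by simp)
      have hlen' : ((d :: ds).drop c.toNat).length = (d :: ds).length - c.toNat := by simp
      rw [hlen']
      -- q' ≥ 0
      have hq'news := (PySem.Int.neg_floordiv_neg_eq_iff_of_pos hc
          (a := (((d :: ds).length - c.toNat : Nat) : Int))).mp rfl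
      have hq'0 : 0 ≤ -(PySem.Int.floordiv (-(((d :: ds).length - c.toNat : Nat) : Int)) c) := by
        nlinarith [hq'news.1, hq'news.2, Int.natCast_nonneg ((d :: ds).length - c.toNat)]
      have hTn : (-(PySem.Int.floordiv (-((d :: ds).length : Int)) c)).toNat
          = (-(PySem.Int.floordiv (-(((d :: ds).length - c.toNat : Nat) : Int)) c)).toNat + 1 := by
        omega
      rw [hTn, List.range_succ_eq_map, List.map_cons, List.map_map, List.append_assoc,
          List.singleton_append]
      refine congrArg (out ++ ·) ?_
      refine congrArg₂ (· :: ·) ?_ ?_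
      · -- head chunk: seq equality
        simp only [Nat.cast_zero, zero_mul, zero_add]
        rw [show PySem.List.slice (d :: ds) (some (0 : Int)) (some c)
              = PySem.List.slice (d :: ds) none (some c) from PySem.List.slice_zero_start _ _]
        rw [pv_seq_eq (PySem.List.slice (d :: ds) none (some c))
              (by rw [PySem.List.slice_to _ (le_of_lt hc)]
                  simp; omega)
              (fun e he => hcf e (PySem.List.mem_of_mem_slice _ _ _ he))]
      · -- tail chunks, shifted
        apply List.map_congr_left
        intro i _
        simp only [Function.comp_def]
        rw [show ((i + 1 : Nat) : Int) * c = (i : Int) * c + c by push_cast; ring]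
        rw [show (i : Int) * c + c + c = ((i : Int) * c) + c + c from rfl]
        rw [pv_slice_shift (d :: ds) ((i : Int) * c) c (by positivity) hc]


set_option maxHeartbeats 1600000 in
theorem main_eq (origin_data : List (String × String)) (c k b : Int)
    (hpre : origin_data = [] ∨ (0 < c ∧ b ≠ 0)) :
    cut_and_kmer origin_data c k b = cut_and_kmer_alt origin_data c k b := by
  rcases hpre with rfl | ⟨hc, -⟩
  · rfl
  · unfold cut_and_kmer cut_and_kmer_alt
    -- A side
    simp only [pv_chunk_loop]
    simp only [pv_foldl_flat]
    simp only [← List.map_eq_flatMap]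
    simp only [List.nil_append]
    rw [List.map_flatMap]
    -- B side
    simp only [PySem.Dict.values, List.foldl_map]
    rw [PySem.List.foldl_congr_mem (PySem.Dict.ofList origin_data).items
      (fun out p => pvBody c k b (((PySem.Str.split? (PySem.Str.strip p.2) ",").getD []).length)
        ((PySem.Str.split? (PySem.Str.strip p.2) ",").getD []) out)
      (fun out p => out ++ pvF c k b p) []
      (by intro acc p _
          simp only [pvF]
          exact pv_body_eq c k b hc _ _ le_rfl (pv_split_comma_free _) acc)]
    simp only [pv_foldl_flat]
    simp only [List.nil_append]
    -- both are flatMaps over items; match pointwise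
    apply pv_flatMap_congr
    intro p _
    rw [pvF, List.map_map]
    simp only [PySem.List.pyRange_one, List.length_map, List.length_range, sub_zero]
    apply List.map_congr_left
    intro i _
    simp only [Function.comp_def, zero_add]
    rfl

-- ===== VERDICT =====
theorem cut_and_kmer_spec : Claim_equal_cut_and_kmer := by
  intro origin_data cut_length k bag_num _ hpre
  unfold Spec_cut_and_kmer
  exact main_eq origin_data cut_length k bag_num hpre
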